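-- pv_equiv track=rewrite | github.com/digin777/spproject | lib/generate.py | generate
-- ===== SOURCE A (Python) =====
-- def generate(no):
-- 	sp_arr=[4,1]
-- 	my_ar=[1,4,1]
-- 	count=2
-- 	while len(my_ar)<=no:
-- 		if len(my_ar)==no:
-- 			break
-- 		if count%2==0:
-- 			my_ar[count]+=1
-- 			count+=1
-- 		else:
-- 			my_ar.extend(sp_arr)
-- 			count=len(my_ar)-1
-- 	return(my_ar[:no])
-- ===== SOURCE B (Python) =====
-- def generate(no):
--     if no <= 3:
--         return [1, 4, 1][:no]
--     return [1 if i == 0 or (i % 2 == 0 and i == no - 1) else (4 if i % 2 else 2)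
--             for i in range(no)]
-- ===== Notes on version B (the rewrite author's own statement) =====
-- stated objective: simpler
-- what changed: B replaces A's grow-and-patch while-loop (extend by [4,1], then bump the last element) with a per-index closed-form rule mapped over range(no), keeping the [1,4,1][:no] slice only as the base case for no <= 3.
import Mathlib
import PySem

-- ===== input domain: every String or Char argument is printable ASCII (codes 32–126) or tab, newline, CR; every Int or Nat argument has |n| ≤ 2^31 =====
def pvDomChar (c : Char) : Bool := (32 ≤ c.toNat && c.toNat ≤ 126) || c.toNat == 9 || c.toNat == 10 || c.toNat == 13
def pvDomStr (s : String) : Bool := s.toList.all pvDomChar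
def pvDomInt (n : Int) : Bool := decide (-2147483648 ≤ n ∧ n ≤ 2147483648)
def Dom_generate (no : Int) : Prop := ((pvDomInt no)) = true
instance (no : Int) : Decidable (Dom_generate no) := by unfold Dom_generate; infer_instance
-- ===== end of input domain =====

-- B replaces A's grow-and-patch while-loop by a per-index closed-form rule (objective: simpler).

-- ===== PORT A =====
-- the while loop of A; state = (my_ar, count); sp_arr = [4,1] inlined at its single use
def generateLoopA (no : Int) (my_ar : List Int) (count : Int) : List Int :=
  if _h1 : (my_ar.length : Int) ≤ no then
    if _h2 : (my_ar.length : Int) = no then my_ar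
    else if _h3 : count % 2 = 0 then
      -- my_ar[count] += 1 : count is always a nonnegative in-range index in every
      -- reachable state of A's loop, so List.modify is exact here
      generateLoopA no (my_ar.modify count.toNat (· + 1)) (count + 1)
    else
      generateLoopA no (my_ar ++ [4, 1]) ((my_ar.length : Int) + 2 - 1)
  else my_ar
termination_by (no + 1 - my_ar.length).toNat * 2 + (if count % 2 = 0 then 1 else 0)
decreasing_by
  · simp only [List.length_modify]
    have hne : ¬ ((count + 1) % 2 = 0) := by omega
    rw [if_pos _h3, if_neg hne]
    omega
  · simp only [List.length_append, List.length_cons, List.length_nil]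
    have hlt : (my_ar.length : Int) < no := lt_of_le_of_ne _h1 _h2
    split <;> omega

def generate (no : Int) : List Int :=
  PySem.List.slice (generateLoopA no [1, 4, 1] 2) none (some no)   -- my_ar[:no]

-- ===== PORT B =====
def generate_alt (no : Int) : List Int :=
  if no ≤ 3 then PySem.List.slice ([1, 4, 1] : List Int) none (some no)   -- [1,4,1][:no]
  else (PySem.List.pyRange 0 no 1).map (fun i =>
    if i = 0 ∨ (i % 2 = 0 ∧ i = no - 1) then 1 else if i % 2 ≠ 0 then 4 else 2)

-- ===== PRECONDITION & SPEC =====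
def Spec_generate (no : Int) (out : List Int) : Prop := out = generate_alt no
instance (no : Int) (out : List Int) : Decidable (Spec_generate no out) := by unfold Spec_generate; infer_instance

-- ===== CLAIM (what is proved, stated in full; the proofs are below) =====
def Claim_equal_generate : Prop := ∀ (no : Int), Dom_generate no → Spec_generate no (generate no)

-- ===== LEMMAS AND PROOFS =====

-- the state of A's loop whenever count = length - 1: length m (odd), 1 at both ends,
-- 4 at odd indices, 2 at interior even indices
def body (m : Nat) : List Int :=
  (List.range m).map (fun i => if i = 0 ∨ i = m - 1 then 1 else if i % 2 = 1 then 4 else 2)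

lemma length_body (m : Nat) : (body m).length = m := by simp [body]

lemma getElem_body (m i : Nat) (h : i < (body m).length) :
    (body m)[i] = if i = 0 ∨ i = m - 1 then 1 else if i % 2 = 1 then 4 else 2 := by
  simp [body]

-- one patch + one extend step of A's loop turns body m into body (m+2)
lemma body_step (m : Nat) (h3 : 3 ≤ m) (hodd : m % 2 = 1) :
    (body m).modify (m - 1) (· + 1) ++ [4, 1] = body (m + 2) := by
  have hlen1 : ((body m).modify (m - 1) (· + 1)).length = m := by simp [length_body]
  apply List.ext_getElem
  · simp [length_body]
  · intro i h1 h2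
    rw [getElem_body]
    rcases Nat.lt_or_ge i m with hi | hi
    · rw [List.getElem_append_left (by omega), List.getElem_modify,
        getElem_body m i (by rw [length_body]; exact hi)]
      split_ifs <;> omega
    · have hi2 : i < m + 2 := by
        rw [length_body] at h2; exact h2
      rcases (by omega : i = m ∨ i = m + 1) with he | he <;> subst he <;>
        rw [List.getElem_append_right (by omega)] <;>
        simp only [hlen1, Nat.sub_self, Nat.add_sub_cancel_left] <;>
        split_ifs <;> simp_all <;> omega

-- B's closed form, as the expression the port maps over range(no)
def bf (no : Int) : List Int :=
  (PySem.List.pyRange 0 no 1).map (fun i =>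
    if i = 0 ∨ (i % 2 = 0 ∧ i = no - 1) then 1 else if i % 2 ≠ 0 then 4 else 2)

-- taking no elements of body m (for no = m-1 or m) gives B's closed form
lemma slice_body (m : Nat) (no : Int) (h3 : 3 ≤ m) (hodd : m % 2 = 1)
    (hlo : (m : Int) - 2 < no) (hhi : no ≤ (m : Int)) :
    PySem.List.slice (body m) none (some no) = bf no := by
  have h0 : (0 : Int) ≤ no := by omega
  rw [PySem.List.slice_to _ h0, bf, PySem.List.pyRange_one]
  apply List.ext_getElem
  · simp [length_body]; omega
  · intro i h1 h2
    have him : i < m := by simp [length_body] at h1; omega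
    have hino : (i : Int) < no := by simp at h2; omega
    rw [List.getElem_take, getElem_body m i (by simp [length_body]; omega)]
    simp only [List.getElem_map, List.getElem_range, zero_add]
    split
    · rename_i hc
      rcases hc with hc | hc
      · simp [hc]
      · -- i = m-1 = no-1 (only possible when no = m, since no > m-2 and i < no)
        have hno : no = (m : Int) := by omega
        have hco : ((i : Int) = 0 ∨ ((i : Int) % 2 = 0 ∧ (i : Int) = no - 1)) :=
          Or.inr ⟨by omega, by omega⟩
        rw [if_pos hco]
    · rename_i hc
      push_neg at hc
      have hi0 : ¬ ((i : Int) = 0) := by omega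
      have hine : ¬ ((i : Int) % 2 = 0 ∧ (i : Int) = no - 1) := by
        rintro ⟨hp, he⟩
        by_cases h : no ≤ (m : Int) - 1
        · have : no = (m : Int) - 1 := by omega
          omega
        · have : no = (m : Int) := by omega
          exact hc.2 (by omega)
      simp only [hi0, hine, or_self, false_or, if_neg, not_false_iff]
      by_cases hp : i % 2 = 1
      · have : ¬ ((i : Int) % 2 = 0) := by omega
        simp [hp, this]
      · have : (i : Int) % 2 = 0 := by omega
        simp [hp, this]

-- invariant run of A's loop from state (body m, m-1)
lemma loop_main (no : Int) (m : Nat) (h3 : 3 ≤ m) (hodd : m % 2 = 1) :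
    PySem.List.slice (generateLoopA no (body m) ((m : Int) - 1)) none (some no) =
      if no ≤ (m : Int) then PySem.List.slice (body m) none (some no) else bf no := by
  by_cases hle : no ≤ (m : Int)
  · rw [if_pos hle]
    rcases eq_or_lt_of_le hle with he | hlt2
    · rw [generateLoopA]
      simp [length_body, ← he]
    · rw [generateLoopA]
      rw [dif_neg (by simp [length_body]; omega)]
  · rw [if_neg (by omega)]
    have hcnt : ((m : Int) - 1) % 2 = 0 := by omega
    rw [generateLoopA,
      dif_pos (by simp [length_body]; omega),
      dif_neg (by simp [length_body]; omega),
      dif_pos hcnt]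
    have htn : ((m : Int) - 1).toNat = m - 1 := by omega
    rw [htn]
    rw [generateLoopA]
    rw [dif_pos (by simp only [List.length_modify, length_body]; omega),
      dif_neg (by simp only [List.length_modify, length_body]; omega),
      dif_neg (by omega)]
    have hlen : (((body m).modify (m - 1) (· + 1)).length : Int) + 2 - 1
        = ((m + 2 : Nat) : Int) - 1 := by
      simp only [List.length_modify, length_body]; omega
    rw [hlen, body_step m h3 hodd]
    have := loop_main no (m + 2) (by omega) (by omega)
    rw [this]
    split
    · exact slice_body (m + 2) no (by omega) (by omega) (by push_cast; omega)
        (by push_cast at *; omega)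
    · rfl
termination_by (no - m).toNat
decreasing_by omega

-- ===== VERDICT (by name: the statement is the Claim_ definition above) =====
theorem generate_spec : Claim_equal_generate := by
  intro no _
  unfold Spec_generate generate generate_alt
  have hb : body 3 = [1, 4, 1] := by decide
  have := loop_main no 3 (by omega) (by omega)
  rw [hb] at this
  norm_num at this
  rw [this]
  split
  · rfl
  · rfl
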